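-- pv_equiv track=rewrite | github.com/JensPfeifle/lattice-grouping | join_elements.py | elset_for_inp
-- ===== SOURCE A (Python) =====
-- def elset_for_inp(name, elems):
--     header_line = '*Elset, elset=_name_'
--     header_line = header_line.replace('_name_', name)
--     data_line = ''
--     for n, e in enumerate(elems):
--         if n % 10 == 0:
--             data_line += '\n'
--         data_line += str(e) + ','
--     data_line += '\n'
--     return header_line + data_line
-- ===== SOURCE B (Python) =====
-- def elset_for_inp(name, elems):
--     chunks = [elems[i:i + 10] for i in range(0, len(elems), 10)]
--     body = ''.join('\n' + ''.join(str(e) + ',' for e in chunk) for chunk in chunks)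
--     return '*Elset, elset={}{}\n'.format(name, body)
-- ===== Notes on version B (the rewrite author's own statement) =====
-- stated objective: alternative
-- what changed: Replaces the single enumerate loop with a modulo-10 counter by slicing elems into chunks of 10, rendering each chunk as a newline plus its comma-terminated elements, and joining; the header is built by str.format instead of str.replace.
import Mathlib
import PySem

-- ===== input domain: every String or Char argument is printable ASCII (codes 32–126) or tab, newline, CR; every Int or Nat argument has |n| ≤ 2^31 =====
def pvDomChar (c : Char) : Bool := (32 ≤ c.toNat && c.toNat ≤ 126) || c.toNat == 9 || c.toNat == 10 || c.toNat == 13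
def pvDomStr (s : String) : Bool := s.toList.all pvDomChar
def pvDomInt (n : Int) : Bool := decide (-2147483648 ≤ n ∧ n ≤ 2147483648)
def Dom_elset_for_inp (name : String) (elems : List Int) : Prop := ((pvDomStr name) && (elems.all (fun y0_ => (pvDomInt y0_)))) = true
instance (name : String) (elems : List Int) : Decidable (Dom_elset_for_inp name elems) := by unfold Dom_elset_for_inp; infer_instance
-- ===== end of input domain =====

-- B builds the body by slicing elems into chunks of 10 and joining rendered chunks,
-- instead of A's single enumerate loop with a modulo-10 counter (objective: alternative).

-- ===== PORT A =====
-- the body of A's 'for n, e in enumerate(elems)' loop: state = (n, data_line)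
def pvStep (st : Nat × String) (e : Int) : Nat × String :=
  (st.1 + 1, (if st.1 % 10 == 0 then st.2 ++ "\n" else st.2) ++ PySem.Int.toStr e ++ ",")

def elset_for_inp (name : String) (elems : List Int) : String :=
  let header_line := "*Elset, elset=_name_"
  let header_line := PySem.Str.replace header_line "_name_" name
  let st := elems.foldl pvStep (0, "")
  header_line ++ (st.2 ++ "\n")

-- ===== PORT B =====
-- ''.join(...)
def pvCat (l : List String) : String := l.foldl (fun a b => a ++ b) ""

-- [elems[i:i+10] for i in range(0, len(elems), 10)] : successive slices of 10
def pvChunks (xs : List Int) : List (List Int) :=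
  match xs with
  | [] => []
  | x :: rest => ((x :: rest).take 10) :: pvChunks ((x :: rest).drop 10)
termination_by xs.length
decreasing_by simp

-- '\n' + ''.join(str(e) + ',' for e in chunk)
def pvChunkStr (c : List Int) : String :=
  "\n" ++ pvCat (c.map (fun e => PySem.Int.toStr e ++ ","))

def elset_for_inp_alt (name : String) (elems : List Int) : String :=
  let body := pvCat ((pvChunks elems).map pvChunkStr)
  "*Elset, elset=" ++ name ++ body ++ "\n"

-- ===== PRECONDITION & SPEC =====
def Spec_elset_for_inp (name : String) (elems : List Int) (out : String) : Prop := out = elset_for_inp_alt name elems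
instance (name : String) (elems : List Int) (out : String) : Decidable (Spec_elset_for_inp name elems out) := by unfold Spec_elset_for_inp; infer_instance

-- ===== CLAIM (what is proved, stated in full; the proofs are below) =====
def Claim_equal_elset_for_inp : Prop := ∀ (name : String) (elems : List Int), Dom_elset_for_inp name elems → Spec_elset_for_inp name elems (elset_for_inp name elems)

-- ===== LEMMAS AND PROOFS =====

theorem pvCat_from (l : List String) (s : String) :
    l.foldl (fun a b => a ++ b) s = s ++ pvCat l := by
  induction l generalizing s with
  | nil => rw [List.foldl_nil]; exact (String.append_empty ..).symm
  | cons a l ih =>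
    rw [List.foldl_cons, ih (s ++ a)]
    have hc : pvCat (a :: l) = a ++ pvCat l := by
      show List.foldl _ ("" ++ a) l = _
      rw [ih ("" ++ a), String.empty_append]
    rw [hc, String.append_assoc]

theorem pvCat_cons (a : String) (l : List String) : pvCat (a :: l) = a ++ pvCat l := by
  show List.foldl _ ("" ++ a) l = _
  rw [pvCat_from, String.empty_append]

theorem pv_fold_nonewline (ys : List Int) (n : Nat) (acc : String)
    (h : ∀ i, i < ys.length → (n + i) % 10 ≠ 0) :
    ys.foldl pvStep (n, acc)
      = (n + ys.length, acc ++ pvCat (ys.map (fun e => PySem.Int.toStr e ++ ","))) := by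
  induction ys generalizing n acc with
  | nil => simp [pvCat]
  | cons y ys ih =>
    have h0 : n % 10 ≠ 0 := by simpa using h 0 (by simp)
    simp only [List.foldl_cons, pvStep, beq_iff_eq, if_neg h0]
    rw [ih (n + 1) _ (fun i hi => by have := h (i + 1) (by simpa using hi); omega)]
    rw [List.map_cons, pvCat_cons]
    refine Prod.ext (by simp; omega) ?_
    simp [String.append_assoc]

theorem pv_fold_chunk (c : List Int) (n : Nat) (acc : String)
    (hne : c ≠ []) (hlen : c.length ≤ 10) (hn : n % 10 = 0) :
    c.foldl pvStep (n, acc) = (n + c.length, acc ++ pvChunkStr c) := by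
  obtain ⟨y, ys, rfl⟩ := List.exists_cons_of_ne_nil hne
  simp only [List.foldl_cons, pvStep, beq_iff_eq, if_pos hn]
  have hys : ys.length ≤ 9 := by simp at hlen; omega
  rw [pv_fold_nonewline ys (n + 1) _ (fun i hi => by omega)]
  rw [pvChunkStr, List.map_cons, pvCat_cons]
  refine Prod.ext (by simp; omega) ?_
  simp [String.append_assoc]

theorem pv_fold_main (xs : List Int) (n : Nat) (acc : String) (hn : n % 10 = 0) :
    xs.foldl pvStep (n, acc) = (n + xs.length, acc ++ pvCat ((pvChunks xs).map pvChunkStr)) := by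
  induction xs using pvChunks.induct generalizing n acc with
  | case1 => simp [pvChunks, pvCat]
  | case2 x rest ih =>
    rw [pvChunks, List.map_cons, pvCat_cons]
    have hsplit : (x :: rest) = (x :: rest).take 10 ++ (x :: rest).drop 10 :=
      (List.take_append_drop 10 (x :: rest)).symm
    conv_lhs => rw [hsplit]
    rw [List.foldl_append]
    rw [pv_fold_chunk ((x :: rest).take 10) n acc (by simp) (by simp) hn]
    by_cases hle : (x :: rest).length ≤ 10
    · have hdrop : (x :: rest).drop 10 = [] := by
        apply List.drop_eq_nil_of_le; simpa using hle
      rw [hdrop]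
      simp only [List.foldl_nil, pvChunks, List.map_nil]
      have htake : (x :: rest).take 10 = x :: rest := List.take_of_length_le hle
      rw [htake]
      refine Prod.ext rfl ?_
      simp [pvCat]
    · have hlong : 10 ≤ rest.length := by simp at hle; omega
      have htlen : ((x :: rest).take 10).length = 10 := by
        simp [List.length_take]; omega
      rw [htlen, ih (n + 10) _ (by omega)]
      refine Prod.ext ?_ ?_
      · simp [List.length_drop]
        omega
      · simp [String.append_assoc]

theorem pv_header (name : String) :
    PySem.Str.replace "*Elset, elset=_name_" "_name_" name = "*Elset, elset=" ++ name := by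
  simp [PySem.Str.replace, PySem.Chars.replace, PySem.Chars.replace.go, String.ext_iff]

-- ===== VERDICT (by name: the statement is the Claim_ definition above) =====
theorem elset_for_inp_spec : Claim_equal_elset_for_inp := by
  intro name elems _
  unfold Spec_elset_for_inp elset_for_inp elset_for_inp_alt
  simp only [pv_header, pv_fold_main elems 0 "" (by decide)]
  simp [String.append_assoc]
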